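-- pv_equiv track=rewrite | github.com/mohammadfaiizan/ProjectI | DSA/Problem/Graph/13_Advanced_Graph_Algorithms/Graph_Isomorphism_Advanced.py | _compute_canonical_form
-- ===== SOURCE A (Python) =====
-- from typing import List, Dict, Set, Tuple, Optional, Union
--
-- def _compute_canonical_form(graph: Dict[int, Set[int]], vertices: Set[int],
--                            labeling: Dict[int, int]) -> str:
--     """Compute canonical adjacency matrix string"""
--     n = len(vertices)
--     matrix = [[0] * n for _ in range(n)]
--
--     for u in vertices:
--         for v in graph[u]:
--             i, j = labeling[u], labeling[v]
--             matrix[i][j] = 1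
--
--     # Convert to string
--     return ''.join(''.join(map(str, row)) for row in matrix)
-- ===== SOURCE B (Python) =====
-- def _compute_canonical_form(graph, vertices, labeling):
--     """Compute canonical adjacency matrix string"""
--     n = len(vertices)
--     pos = sorted(labeling[u] * n + labeling[v] for u in vertices for v in graph[u])
--     out = []
--     prev = 0
--     for p in pos:
--         if p >= prev:
--             out.append('0' * (p - prev))
--             out.append('1')
--             prev = p + 1
--     out.append('0' * (n * n - prev))
--     return ''.join(out)
-- ===== Notes on version B (the rewrite author's own statement) =====
-- stated objective: alternative
-- what changed: Replaces A's allocate-then-index-assign dense n-by-n matrix with a sort-then-scan: the labeled edges are flattened to integer positions i*n+j, sorted, and the output string is emitted in one left-to-right pass by filling the zero gaps between consecutive sorted positions (duplicates skipped by the running cursor); no matrix is ever built or re-read.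
-- outside the precondition, e.g. on _compute_canonical_form({0: {0}}, {0}, {0: -1}): A returns '1', B returns '0'
import Mathlib
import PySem

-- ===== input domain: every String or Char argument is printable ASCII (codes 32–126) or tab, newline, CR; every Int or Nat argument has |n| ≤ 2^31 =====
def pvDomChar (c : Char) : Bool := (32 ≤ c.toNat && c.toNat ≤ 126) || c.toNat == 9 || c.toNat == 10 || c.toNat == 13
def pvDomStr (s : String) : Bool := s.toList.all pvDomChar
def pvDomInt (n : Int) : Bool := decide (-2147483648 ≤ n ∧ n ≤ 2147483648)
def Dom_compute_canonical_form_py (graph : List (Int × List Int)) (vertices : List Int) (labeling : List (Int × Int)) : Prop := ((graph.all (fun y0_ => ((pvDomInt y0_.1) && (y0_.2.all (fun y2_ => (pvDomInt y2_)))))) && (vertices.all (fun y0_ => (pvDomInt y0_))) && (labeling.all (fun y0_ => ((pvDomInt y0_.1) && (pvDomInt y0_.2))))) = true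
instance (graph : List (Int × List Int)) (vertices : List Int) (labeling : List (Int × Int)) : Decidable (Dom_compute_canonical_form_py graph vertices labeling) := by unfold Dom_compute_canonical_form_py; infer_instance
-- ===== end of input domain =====

-- B replaces A's mutable dense n×n matrix (allocate, index-assign, re-read) by sorting the labeled
-- edge positions i*n+j and emitting the bitstring in one gap-filling scan (objective: alternative).


-- ===== PORT A =====
-- shared dict lookups: graph[u] and labeling[x]; the defaults are only reached where the Python
-- raises KeyError, and those inputs are excluded by Pre_
def pvGetG (graph : List (Int × List Int)) (u : Int) : List Int :=
  PySem.Dict.getD (PySem.Dict.mk graph) u []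
def pvGetL (labeling : List (Int × Int)) (x : Int) : Int :=
  PySem.Dict.getD (PySem.Dict.mk labeling) x 0

-- matrix[i][j] = 1 with Python index semantics (negative wrap); the no-op branches are exactly
-- where Python raises IndexError, excluded by Pre_
def pySetCell (m : List (List Int)) (i j : Int) : List (List Int) :=
  match PySem.List.pyGet? m i with
  | none => m
  | some row =>
    match PySem.List.pySet? row j (1 : Int) with
    | none => m
    | some row' => PySem.List.pySetD m i row'

def compute_canonical_form_py (graph : List (Int × List Int)) (vertices : List Int) (labeling : List (Int × Int)) : String :=
  let n := vertices.length
  let matrix0 : List (List Int) := List.replicate n (List.replicate n (0 : Int))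
  let matrix := vertices.foldl (fun m u =>
      (pvGetG graph u).foldl (fun m v =>
        pySetCell m (pvGetL labeling u) (pvGetL labeling v)) m) matrix0
  PySem.Str.join "" (matrix.map (fun row => PySem.Str.join "" (row.map PySem.Int.toStr)))

-- ===== PORT B =====
-- '0' * k (empty for k ≤ 0, as in Python)
def pvZeros (k : Int) : String := String.ofList (List.replicate k.toNat '0')

def compute_canonical_form_py_alt (graph : List (Int × List Int)) (vertices : List Int) (labeling : List (Int × Int)) : String :=
  let n : Int := PySem.List.len vertices
  let pos := PySem.List.sorted (vertices.flatMap (fun u =>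
      (pvGetG graph u).map (fun v => pvGetL labeling u * n + pvGetL labeling v))) (fun x => x) false
  let res := pos.foldl (fun (acc : List String × Int) p =>
      if acc.2 ≤ p then (acc.1 ++ [pvZeros (p - acc.2), "1"], p + 1) else acc)
    (([] : List String), (0 : Int))
  PySem.Str.join "" (res.1 ++ [pvZeros (n * n - res.2)])

-- ===== PRECONDITION & SPEC =====
-- Pre_ excludes the inputs where A raises (KeyError: a vertex or neighbour missing from graph or
-- labeling; IndexError: a label outside [-n, n)) and the labels in [-n, 0), on which A's filled
-- cell comes from Python's negative-index wraparound — an artefact of the list indexing, while B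
-- treats such a label as matching no row/column of the canonical matrix.
def Pre_compute_canonical_form_py (graph : List (Int × List Int)) (vertices : List Int) (labeling : List (Int × Int)) : Prop :=
  ∀ u ∈ vertices,
    (PySem.Dict.mk graph).contains u = true ∧
    (((PySem.Dict.mk labeling).get? u).any (fun i => decide (0 ≤ i ∧ i < (vertices.length : Int)))) = true ∧
    ∀ v ∈ pvGetG graph u,
      (((PySem.Dict.mk labeling).get? v).any (fun j => decide (0 ≤ j ∧ j < (vertices.length : Int)))) = true
instance (graph : List (Int × List Int)) (vertices : List Int) (labeling : List (Int × Int)) : Decidable (Pre_compute_canonical_form_py graph vertices labeling) := by unfold Pre_compute_canonical_form_py; infer_instance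

def pvWitness_compute_canonical_form_py : (List (Int × List Int)) × List Int × (List (Int × Int)) :=
  ([(0, [0, 1]), (1, [])], [0, 1], [(0, 1), (1, 0)])

def Spec_compute_canonical_form_py (graph : List (Int × List Int)) (vertices : List Int) (labeling : List (Int × Int)) (out : String) : Prop := out = compute_canonical_form_py_alt graph vertices labeling
instance (graph : List (Int × List Int)) (vertices : List Int) (labeling : List (Int × Int)) (out : String) : Decidable (Spec_compute_canonical_form_py graph vertices labeling out) := by unfold Spec_compute_canonical_form_py; infer_instance

-- ===== CLAIM (what is proved, stated in full; the proofs are below) =====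
def Claim_equal_compute_canonical_form_py : Prop := ∀ (graph : List (Int × List Int)) (vertices : List Int) (labeling : List (Int × Int)), Dom_compute_canonical_form_py graph vertices labeling → Pre_compute_canonical_form_py graph vertices labeling → Spec_compute_canonical_form_py graph vertices labeling (compute_canonical_form_py graph vertices labeling)

-- ===== LEMMAS AND PROOFS =====

-- the list of labeled edge pairs A's fills are driven by
def pvPairs (graph : List (Int × List Int)) (vertices : List Int) (labeling : List (Int × Int)) : List (Int × Int) :=
  vertices.flatMap (fun u => (pvGetG graph u).map (fun v => (pvGetL labeling u, pvGetL labeling v)))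

-- the canonical matrix determined by a pair list
def pvMat (S : List (Int × Int)) (n : Nat) : List (List Int) :=
  (List.range n).map (fun (i : Nat) => (List.range n).map (fun (j : Nat) =>
    if ((i : Int), (j : Int)) ∈ S then (1 : Int) else 0))

theorem pvMat_nil (n : Nat) : pvMat [] n = List.replicate n (List.replicate n (0 : Int)) := by
  simp [pvMat, List.map_const']

theorem pvSetCell_mat (S : List (Int × Int)) (n : Nat) (i j : Int)
    (hi0 : 0 ≤ i) (hin : i < (n : Int)) (hj0 : 0 ≤ j) (hjn : j < (n : Int)) :
    pySetCell (pvMat S n) i j = pvMat (S ++ [(i, j)]) n := by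
  obtain ⟨a, rfl⟩ : ∃ a : Nat, i = (a : Int) := ⟨i.toNat, (Int.toNat_of_nonneg hi0).symm⟩
  obtain ⟨b, rfl⟩ : ∃ b : Nat, j = (b : Int) := ⟨j.toNat, (Int.toNat_of_nonneg hj0).symm⟩
  have ha : a < n := by exact_mod_cast hin
  have hb : b < n := by exact_mod_cast hjn
  have hlen : (pvMat S n).length = n := by simp [pvMat]
  have hrow : (pvMat S n)[a]'(by omega) = (List.range n).map (fun (jj : Nat) =>
      if ((a : Int), (jj : Int)) ∈ S then (1 : Int) else 0) := by
    simp only [pvMat, List.getElem_map, List.getElem_range]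
  rw [pySetCell, PySem.List.pyGet?_natCast]
  rw [List.getElem?_eq_getElem (by omega)]
  simp only [hrow]
  rw [PySem.List.pySet?_natCast _ b _ (by simp [hb])]
  simp only [PySem.List.pySetD_natCast]
  apply List.ext_getElem (by simp [pvMat])
  intro k hk hk'
  have hkn : k < n := by simpa [pvMat] using hk'
  rw [List.getElem_set]
  by_cases hka : a = k
  · subst hka
    rw [if_pos rfl]
    apply List.ext_getElem (by simp [pvMat])
    intro m hm hm'
    have hmn : m < n := by simpa using hm
    rw [List.getElem_set]
    simp only [pvMat, List.getElem_map, List.getElem_range, List.mem_append, List.mem_singleton]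
    by_cases hbm : b = m
    · subst hbm; simp
    · have hne : ¬ (((a:Int),(m:Int)) = ((a:Int),(b:Int))) := by
        simp only [Prod.mk.injEq]; omega
      simp [hne, hbm]
  · rw [if_neg hka]
    simp only [pvMat, List.getElem_map, List.getElem_range]
    congr 1
    funext jj
    have hne : ¬ (((k:Int),(jj:Int)) = ((a:Int),(b:Int))) := by
      simp only [Prod.mk.injEq]; omega
    simp [hne]

theorem pvFold_mat (ps : List (Int × Int)) (S : List (Int × Int)) (n : Nat)
    (h : ∀ p ∈ ps, 0 ≤ p.1 ∧ p.1 < (n : Int) ∧ 0 ≤ p.2 ∧ p.2 < (n : Int)) :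
    ps.foldl (fun m p => pySetCell m p.1 p.2) (pvMat S n) = pvMat (S ++ ps) n := by
  induction ps generalizing S with
  | nil => simp
  | cons p t ih =>
    have hp := h p (by simp)
    simp only [List.foldl_cons, pvSetCell_mat S n p.1 p.2 hp.1 hp.2.1 hp.2.2.1 hp.2.2.2]
    rw [ih (S ++ [(p.1, p.2)]) (fun q hq => h q (by simp [hq]))]
    simp

theorem flatten_intersperse_nil {α : Type} (xss : List (List α)) :
    (List.intersperse [] xss).flatten = xss.flatten := by
  induction xss with
  | nil => rfl
  | cons x t ih => cases t <;> simp_all [List.intersperse]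

theorem chars_join_nil (xss : List (List Char)) : PySem.Chars.join [] xss = xss.flatten := by
  simp [PySem.Chars.join, List.intercalate, flatten_intersperse_nil]

theorem pvToListEmpty : ("" : String).toList = [] := rfl
theorem pvS1 : ("1" : String).toList = ['1'] := rfl
theorem pvZerosToList (k : Int) : (pvZeros k).toList = List.replicate k.toNat '0' := by simp [pvZeros]

theorem pvGetL_eq (labeling : List (Int × Int)) (x i : Int)
    (h : (PySem.Dict.mk labeling).get? x = some i) : pvGetL labeling x = i := by
  simp [pvGetL, PySem.Dict.getD, h]

theorem pvBounds (graph : List (Int × List Int)) (vertices : List Int) (labeling : List (Int × Int))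
    (hpre : Pre_compute_canonical_form_py graph vertices labeling) :
    ∀ p ∈ pvPairs graph vertices labeling,
      0 ≤ p.1 ∧ p.1 < (vertices.length : Int) ∧ 0 ≤ p.2 ∧ p.2 < (vertices.length : Int) := by
  intro p hp
  simp only [pvPairs, List.mem_flatMap, List.mem_map] at hp
  obtain ⟨u, hu, v, hv, rfl⟩ := hp
  obtain ⟨-, hlu, hlv⟩ := hpre u hu
  have h2 := hlv v hv
  cases hcu : (PySem.Dict.mk labeling).get? u with
  | none => rw [hcu] at hlu; simp [Option.any] at hlu
  | some i =>
    cases hcv : (PySem.Dict.mk labeling).get? v with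
    | none => rw [hcv] at h2; simp [Option.any] at h2
    | some j =>
      rw [hcu] at hlu; rw [hcv] at h2
      simp only [Option.any_some, decide_eq_true_eq] at hlu h2
      rw [pvGetL_eq labeling u i hcu, pvGetL_eq labeling v j hcv]
      exact ⟨hlu.1, hlu.2, h2.1, h2.2⟩

-- ---------- A's string as a flat indicator over positions i*n+j ----------

-- in-range pairs correspond bijectively to their flattened positions
theorem pvPos_mem_iff (S : List (Int × Int)) (n : Nat)
    (hb : ∀ p ∈ S, 0 ≤ p.1 ∧ p.1 < (n : Int) ∧ 0 ≤ p.2 ∧ p.2 < (n : Int))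
    (i j : Nat) (hi : i < n) (hj : j < n) :
    (((i : Int), (j : Int)) ∈ S) ↔ ((i : Int) * n + j) ∈ S.map (fun p => p.1 * (n : Int) + p.2) := by
  constructor
  · intro h
    exact List.mem_map.mpr ⟨(_, _), h, rfl⟩
  · intro h
    obtain ⟨p, hp, heq⟩ := List.mem_map.mp h
    obtain ⟨h1, h2, h3, h4⟩ := hb p hp
    obtain ⟨a, ha⟩ : ∃ a : Nat, p.1 = (a : Int) := ⟨p.1.toNat, (Int.toNat_of_nonneg h1).symm⟩
    obtain ⟨b, hbb⟩ : ∃ b : Nat, p.2 = (b : Int) := ⟨p.2.toNat, (Int.toNat_of_nonneg h3).symm⟩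
    rw [ha, hbb] at heq
    have han : a < n := by rw [ha] at h2; exact_mod_cast h2
    have hbn : b < n := by rw [hbb] at h4; exact_mod_cast h4
    have heqn : a * n + b = i * n + j := by exact_mod_cast heq
    have hn0 : 0 < n := by omega
    have h5 : (a * n + b) / n = a := by
      rw [Nat.add_comm, Nat.add_mul_div_right b a hn0, Nat.div_eq_of_lt hbn]; omega
    have h6 : (i * n + j) / n = i := by
      rw [Nat.add_comm, Nat.add_mul_div_right j i hn0, Nat.div_eq_of_lt hj]; omega
    have hai : a = i := by rw [← h5, heqn, h6]
    have hbj : b = j := by subst hai; omega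
    have : p = ((i : Int), (j : Int)) := by
      rw [← hai, ← hbj, ← ha, ← hbb]
    rw [← this]; exact hp

-- flattening a row-by-row nested range into one flat range of positions
theorem pvFlat_range (b : Nat) (f : Nat → Char) :
    ∀ a : Nat, (List.range a).flatMap (fun i => (List.range b).map (fun j => f (i * b + j)))
      = (List.range (a * b)).map f := by
  intro a
  induction a with
  | zero => simp
  | succ a ih =>
    rw [List.range_succ, List.flatMap_append, ih]
    have : (a + 1) * b = a * b + b := by ring
    rw [this, List.range_add, List.map_append, List.map_map]
    simp [Function.comp_def]

-- ---------- B's gap-filling scan ----------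

-- the characters B's loop emits, and the final cursor
def pvEmit : List Int → Int → List Char
  | [], _ => []
  | p :: t, prev =>
    if prev ≤ p then List.replicate (p - prev).toNat '0' ++ '1' :: pvEmit t (p + 1)
    else pvEmit t prev

def pvFinal : List Int → Int → Int
  | [], prev => prev
  | p :: t, prev => if prev ≤ p then pvFinal t (p + 1) else pvFinal t prev

theorem pvFold_snd (ps : List Int) (acc : List String) (prev : Int) :
    (ps.foldl (fun (a : List String × Int) p =>
        if a.2 ≤ p then (a.1 ++ [pvZeros (p - a.2), "1"], p + 1) else a) (acc, prev)).2
      = pvFinal ps prev := by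
  induction ps generalizing acc prev with
  | nil => rfl
  | cons p t ih =>
    simp only [List.foldl_cons, pvFinal]
    by_cases h : prev ≤ p
    · simp only [h, if_pos]; exact ih _ _
    · simp only [if_neg h]; exact ih _ _

theorem pvFold_fst (ps : List Int) (acc : List String) (prev : Int) :
    ((ps.foldl (fun (a : List String × Int) p =>
        if a.2 ≤ p then (a.1 ++ [pvZeros (p - a.2), "1"], p + 1) else a) (acc, prev)).1).flatMap
        String.toList
      = acc.flatMap String.toList ++ pvEmit ps prev := by
  induction ps generalizing acc prev with
  | nil => simp [pvEmit]
  | cons p t ih =>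
    simp only [List.foldl_cons, pvEmit]
    by_cases h : prev ≤ p
    · simp only [h, if_true]
      rw [ih]
      simp [pvZerosToList, pvS1]
    · simp only [if_neg h]
      exact ih _ _

-- the scan over a sorted position list is the indicator string over [prev, N)
theorem pvEmit_spec (ps : List Int) (prev N : Int)
    (hs : ps.Pairwise (· ≤ ·)) (hN : ∀ p ∈ ps, p < N) :
    pvEmit ps prev ++ List.replicate (N - pvFinal ps prev).toNat '0'
      = (PySem.List.pyRange prev N 1).map (fun k => if k ∈ ps then '1' else '0') := by
  induction ps generalizing prev with
  | nil =>
    simp only [pvEmit, pvFinal, List.nil_append, List.not_mem_nil, if_false]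
    rw [List.map_const', PySem.List.length_pyRange_one]
  | cons p t ih =>
    rw [List.pairwise_cons] at hs
    obtain ⟨hpt, hts⟩ := hs
    have hpN : p < N := hN p (by simp)
    have htN : ∀ q ∈ t, q < N := fun q hq => hN q (by simp [hq])
    by_cases h : prev ≤ p
    · simp only [pvEmit, pvFinal, if_pos h]
      rw [List.append_assoc, List.cons_append, ih (p + 1) hts htN]
      rw [PySem.List.pyRange_one_append prev p N h (by omega),
        PySem.List.pyRange_one_cons hpN, List.map_append, List.map_cons]
      have h1 : (PySem.List.pyRange prev p 1).map (fun k => if k ∈ p :: t then '1' else '0')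
          = List.replicate (p - prev).toNat '0' := by
        rw [show (PySem.List.pyRange prev p 1).map (fun k => if k ∈ p :: t then '1' else '0')
            = (PySem.List.pyRange prev p 1).map (fun _ => '0') from
          List.map_congr_left (by
            intro k hk
            rw [PySem.List.mem_pyRange_one] at hk
            have hk1 : k ≠ p := by omega
            have hk2 : k ∉ t := fun hmem => by have := hpt k hmem; omega
            simp [hk1, hk2])]
        rw [List.map_const', PySem.List.length_pyRange_one]
      have h2 : (if p ∈ p :: t then '1' else '0') = '1' := by simp
      have h3 : (PySem.List.pyRange (p + 1) N 1).map (fun k => if k ∈ p :: t then '1' else '0')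
          = (PySem.List.pyRange (p + 1) N 1).map (fun k => if k ∈ t then '1' else '0') := by
        apply List.map_congr_left
        intro k hk
        rw [PySem.List.mem_pyRange_one] at hk
        have : k ≠ p := by omega
        simp [this]
      rw [h1, h2, h3]
    · simp only [pvEmit, pvFinal, if_neg h]
      rw [ih prev hts htN]
      apply List.map_congr_left
      intro k hk
      rw [PySem.List.mem_pyRange_one] at hk
      have : k ≠ p := by omega
      simp [this]

-- B's raw (unsorted) position list is the flattening of A's pair list
theorem pvRaw_eq (graph : List (Int × List Int)) (vertices : List Int) (labeling : List (Int × Int)) (n : Int) :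
    vertices.flatMap (fun u => (pvGetG graph u).map (fun v =>
        pvGetL labeling u * n + pvGetL labeling v))
      = (pvPairs graph vertices labeling).map (fun p => p.1 * n + p.2) := by
  simp [pvPairs, List.map_flatMap, List.map_map, Function.comp_def]

theorem pvFlatten_singleton {a b : Type} (l : List a) (h : a -> b) :
    (l.map (fun x => [h x])).flatten = l.map h := by
  induction l with
  | nil => rfl
  | cons x t ih => simp [ih]

-- ===== VERDICT (by name: the statement is the Claim_ definition above) =====
theorem compute_canonical_form_py_spec : Claim_equal_compute_canonical_form_py := by
  intro graph vertices labeling _ hpre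
  unfold Spec_compute_canonical_form_py compute_canonical_form_py compute_canonical_form_py_alt
  simp only
  have hbounds := pvBounds graph vertices labeling hpre
  set n := vertices.length with hn
  -- A's matrix is the canonical pvMat of the pair list
  have hfold : vertices.foldl (fun m u => (pvGetG graph u).foldl (fun m v =>
      pySetCell m (pvGetL labeling u) (pvGetL labeling v)) m)
      (List.replicate n (List.replicate n (0 : Int)))
      = pvMat (pvPairs graph vertices labeling) n := by
    have h := pvFold_mat (pvPairs graph vertices labeling) [] n hbounds
    rw [List.nil_append] at h
    rw [← h, ← pvMat_nil, pvPairs, List.foldl_flatMap]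
    simp only [List.foldl_map]
  rw [hfold]
  apply String.toList_inj.mp
  -- B's side: foldl → pvEmit/pvFinal, then the gap lemma
  set pairs := pvPairs graph vertices labeling with hpairs
  set raw := vertices.flatMap (fun u => (pvGetG graph u).map (fun v =>
      pvGetL labeling u * (PySem.List.len vertices) + pvGetL labeling v)) with hraw
  set pos := PySem.List.sorted raw (fun x => x) false with hpos
  have hposmem : ∀ k, k ∈ pos ↔ k ∈ pairs.map (fun p => p.1 * (n : Int) + p.2) := by
    intro k
    rw [hpos, PySem.List.mem_sorted, hraw, PySem.List.len_eq, pvRaw_eq]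
  have hposlt : ∀ p ∈ pos, p < (n : Int) * n := by
    intro k hk
    obtain ⟨p, hp, rfl⟩ := List.mem_map.mp ((hposmem k).mp hk)
    obtain ⟨h1, h2, h3, h4⟩ := hbounds p hp
    nlinarith [h1, h2, h3, h4]
  have hsorted : pos.Pairwise (· ≤ ·) := PySem.List.sorted_pairwise raw (fun x => x)
  -- compute B's character list
  have hB : (PySem.Str.join ""
      (((pos.foldl (fun (a : List String × Int) p =>
          if a.2 ≤ p then (a.1 ++ [pvZeros (p - a.2), "1"], p + 1) else a)
        (([] : List String), (0 : Int))).1) ++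
        [pvZeros ((PySem.List.len vertices) * (PySem.List.len vertices) -
          (pos.foldl (fun (a : List String × Int) p =>
            if a.2 ≤ p then (a.1 ++ [pvZeros (p - a.2), "1"], p + 1) else a)
          (([] : List String), (0 : Int))).2)])).toList
      = (PySem.List.pyRange 0 ((n : Int) * n) 1).map (fun k => if k ∈ pos then '1' else '0') := by
    rw [PySem.Str.toList_join, pvToListEmpty, chars_join_nil]
    rw [List.map_append, List.flatten_append]
    rw [← List.flatMap_def, pvFold_fst, pvFold_snd]
    simp only [List.map_cons, List.map_nil, List.flatten_cons, List.flatten_nil,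
      List.append_nil, List.flatMap_nil, List.nil_append, pvZerosToList, PySem.List.len_eq]
    exact pvEmit_spec pos 0 ((n : Int) * n) hsorted hposlt
  rw [hB]
  -- A's side: the matrix string is the same indicator list, row by row
  have hposn : ((n : Int) * n) = ((n * n : Nat) : Int) := by push_cast; ring
  rw [hposn, PySem.List.pyRange_zero_nat, List.map_map]
  rw [← pvFlat_range n (((fun k => if k ∈ pos then '1' else '0')) ∘ (fun (k : Nat) => (k : Int)))]
  rw [PySem.Str.toList_join, pvToListEmpty, chars_join_nil, List.map_map]
  simp only [pvMat, List.map_map]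
  rw [← List.flatMap_def]
  apply List.flatMap_congr
  intro i hi
  rw [List.mem_range] at hi
  simp only [Function.comp_def, PySem.Str.toList_join, pvToListEmpty, chars_join_nil,
    List.map_map]
  have hcell : ∀ j ∈ List.range n,
      ((fun (j : Nat) => (PySem.Int.toStr (if ((i : Int), (j : Int)) ∈ pairs then (1 : Int) else 0)).toList)) j
      = [if (((i * n + j : Nat) : Int)) ∈ pos then '1' else '0'] := by
    intro j hj
    rw [List.mem_range] at hj
    have hcast : (((i * n + j : Nat) : Int)) = (i : Int) * n + j := by push_cast; ring
    rw [hcast]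
    have hmem := pvPos_mem_iff pairs n hbounds i j hi hj
    by_cases hc : ((i : Int), (j : Int)) ∈ pairs
    · have hin : ((i : Int) * n + j) ∈ pos := (hposmem _).mpr (hmem.mp hc)
      simp [hc, hin]; decide
    · have hout : ((i : Int) * n + j) ∉ pos := fun hin => hc (hmem.mpr ((hposmem _).mp hin))
      simp [hc, hout]; decide
  rw [List.map_congr_left hcell, pvFlatten_singleton]
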